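-- pv_equiv track=rewrite | github.com/FreeTAKTeam/Reticulum-Community-Hub | reticulum_telemetry_hub/reticulum_server/__main__.py | _first_present_value
-- ===== SOURCE A (Python) =====
-- def _first_present_value(entry: dict, keys: list[str]):
--     """Return the first key value present in a dictionary.
--
--     Args:
--         entry (dict): Attachment metadata map.
--         keys (list[str]): Keys to check in order.
--
--     Returns:
--         Any: The first matching value or ``None`` when absent.
--     """
--
--     lower_lookup = {}
--     for key in entry:
--         if isinstance(key, str):
--             lower_lookup.setdefault(key.lower(), key)
--     for key in keys:
--         if key in entry:
--             return entry.get(key)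
--         lookup_key = lower_lookup.get(key.lower())
--         if lookup_key is not None:
--             return entry.get(lookup_key)
--     return None
-- ===== SOURCE B (Python) =====
-- def _first_present_value(entry: dict, keys: list[str]):
--     """Return the first key value present in a dictionary (case-insensitive fallback)."""
--     for key in keys:
--         if key in entry:
--             return entry.get(key)
--         target = key.lower()
--         for k in entry:
--             if isinstance(k, str) and k.lower() == target:
--                 return entry.get(k)
--     return None
-- ===== Notes on version B (the rewrite author's own statement) =====
-- stated objective: simpler
-- what changed: Drops the prebuilt lowercase-index dict; B scans the entry's keys directly per requested key, exact match first, then first case-insensitive match.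
import Mathlib
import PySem

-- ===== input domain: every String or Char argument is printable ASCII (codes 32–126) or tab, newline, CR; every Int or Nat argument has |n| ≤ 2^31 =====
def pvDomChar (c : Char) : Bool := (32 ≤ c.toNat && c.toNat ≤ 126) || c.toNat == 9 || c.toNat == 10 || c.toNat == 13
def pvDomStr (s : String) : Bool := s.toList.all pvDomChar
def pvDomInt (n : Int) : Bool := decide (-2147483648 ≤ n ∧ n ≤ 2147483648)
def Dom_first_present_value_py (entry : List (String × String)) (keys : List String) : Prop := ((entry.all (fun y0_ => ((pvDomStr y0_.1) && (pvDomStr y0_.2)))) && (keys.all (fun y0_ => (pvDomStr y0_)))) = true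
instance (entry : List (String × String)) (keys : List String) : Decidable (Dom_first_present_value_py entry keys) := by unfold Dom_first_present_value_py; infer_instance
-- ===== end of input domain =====

-- B drops A's prebuilt lowercase-index dict and instead scans the entry's keys per requested key
-- (exact match first, then first case-insensitive match): simpler, no auxiliary structure.

-- ===== PORT A =====
-- entry.get(k) on the dict, ported as first-match lookup on the association list
def pvGetEntry (entry : List (String × String)) (k : String) : Option String :=
  (entry.find? (fun p => p.1 == k)).map (·.2)

-- the 'for key in entry: lower_lookup.setdefault(key.lower(), key)' loop (isinstance(key, str) is always true here)
def pvLowerLookup (entry : List (String × String)) : PySem.Dict String String :=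
  entry.foldl (fun d p => d.setdefault (PySem.Str.lower p.1) p.1) PySem.Dict.empty

-- the 'for key in keys' loop of A
def pvLoopA (entry : List (String × String)) (ll : PySem.Dict String String) : List String → Option String
  | [] => none
  | key :: rest =>
    if entry.any (fun p => p.1 == key) then pvGetEntry entry key
    else
      match ll.get? (PySem.Str.lower key) with
      | some lk => pvGetEntry entry lk
      | none => pvLoopA entry ll rest

def first_present_value_py (entry : List (String × String)) (keys : List String) : Option String :=
  pvLoopA entry (pvLowerLookup entry) keys

-- ===== PORT B =====
-- B's inner 'for k in entry' scan: none = no case-insensitive match (continue), some v = 'return entry.get(k)'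
def pvScanB (pairs full : List (String × String)) (target : String) : Option (Option String) :=
  match pairs with
  | [] => none
  | p :: rest =>
    if PySem.Str.lower p.1 == target then some (pvGetEntry full p.1)
    else pvScanB rest full target

def pvLoopB (entry : List (String × String)) : List String → Option String
  | [] => none
  | key :: rest =>
    if entry.any (fun p => p.1 == key) then pvGetEntry entry key
    else
      match pvScanB entry entry (PySem.Str.lower key) with
      | some v => v
      | none => pvLoopB entry rest

def first_present_value_py_alt (entry : List (String × String)) (keys : List String) : Option String :=
  pvLoopB entry keys

-- ===== PRECONDITION & SPEC =====
def Spec_first_present_value_py (entry : List (String × String)) (keys : List String) (out : Option String) : Prop := out = first_present_value_py_alt entry keys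
instance (entry : List (String × String)) (keys : List String) (out : Option String) : Decidable (Spec_first_present_value_py entry keys out) := by unfold Spec_first_present_value_py; infer_instance

-- ===== CLAIM (what is proved, stated in full; the proofs are below) =====
def Claim_equal_first_present_value_py : Prop := ∀ (entry : List (String × String)) (keys : List String), Dom_first_present_value_py entry keys → Spec_first_present_value_py entry keys (first_present_value_py entry keys)

-- ===== LEMMAS AND PROOFS =====

-- A's lower_lookup, looked up at t, is the first entry key whose lower() equals t.
theorem pvLowerLookup_get?
    (l : List (String × String)) (d : PySem.Dict String String) (t : String) :
    (l.foldl (fun d p => d.setdefault (PySem.Str.lower p.1) p.1) d).get? t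
      = (d.get? t).or ((l.find? (fun p => PySem.Str.lower p.1 == t)).map (·.1)) := by
  induction l generalizing d with
  | nil => simp
  | cons p rest ih =>
    simp only [List.foldl_cons, List.find?]
    rw [ih]
    by_cases ht : PySem.Str.lower p.1 = t
    · subst ht
      simp only [beq_self_eq_true]
      rcases hc : d.contains (PySem.Str.lower p.1) with hfalse | htrue
      · rw [PySem.Dict.setdefault_of_not_contains d _ hc, PySem.Dict.get?_insert_self]
        have : d.get? (PySem.Str.lower p.1) = none := by
          by_contra h
          rcases Option.ne_none_iff_exists'.mp h with ⟨v, hv⟩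
          have := PySem.Dict.contains_eq_isSome_get? (d := d) (k := PySem.Str.lower p.1)
          rw [hv] at this; rw [hc] at this; simp at this
        simp [this]
      · rw [PySem.Dict.setdefault_of_contains d _ hc]
        have : (d.get? (PySem.Str.lower p.1)).isSome := by
          rw [← PySem.Dict.contains_eq_isSome_get?, hc]
        rcases Option.isSome_iff_exists.mp this with ⟨v, hv⟩
        simp [hv]
    · have hne : (PySem.Str.lower p.1 == t) = false := by simp [ht]
      have hget : (d.setdefault (PySem.Str.lower p.1) p.1).get? t = d.get? t := by
        rcases hc : d.contains (PySem.Str.lower p.1) with hfalse | htrue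
        · rw [PySem.Dict.setdefault_of_not_contains d _ hc,
              PySem.Dict.get?_insert_of_ne (hne := fun h => ht h.symm)]
        · rw [PySem.Dict.setdefault_of_contains d _ hc]
      rw [hget, hne]

-- B's inner scan returns the looked-up value of the first entry key whose lower() equals target.
theorem pvScanB_eq (pairs full : List (String × String)) (t : String) :
    pvScanB pairs full t
      = (pairs.find? (fun p => PySem.Str.lower p.1 == t)).map (fun p => pvGetEntry full p.1) := by
  induction pairs with
  | nil => rfl
  | cons p rest ih =>
    simp only [pvScanB, List.find?]
    by_cases h : PySem.Str.lower p.1 = t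
    · simp [h]
    · have hne : (PySem.Str.lower p.1 == t) = false := by simp [h]
      rw [hne]; simpa using ih

theorem pvLoop_eq (entry : List (String × String)) (keys : List String) :
    pvLoopA entry (pvLowerLookup entry) keys = pvLoopB entry keys := by
  induction keys with
  | nil => rfl
  | cons key rest ih =>
    simp only [pvLoopA, pvLoopB]
    by_cases hmem : entry.any (fun p => p.1 == key)
    · simp [hmem]
    · simp only [hmem, if_false, Bool.false_eq_true]
      rw [pvScanB_eq]
      have hll : (pvLowerLookup entry).get? (PySem.Str.lower key)
          = (entry.find? (fun p => PySem.Str.lower p.1 == PySem.Str.lower key)).map (·.1) := by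
        unfold pvLowerLookup
        rw [pvLowerLookup_get? entry PySem.Dict.empty (PySem.Str.lower key)]
        simp
      rw [hll]
      cases hf : entry.find? (fun p => PySem.Str.lower p.1 == PySem.Str.lower key) with
      | none => simpa using ih
      | some p => simp

-- ===== VERDICT (by name: the statement is the Claim_ definition above) =====
theorem first_present_value_py_spec : Claim_equal_first_present_value_py := by
  intro entry keys _
  unfold Spec_first_present_value_py first_present_value_py first_present_value_py_alt
  exact pvLoop_eq entry keys
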